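-- pv_equiv track=rewrite | github.com/pabloschwarzenberg/grader | tema2_ej2/tema2_ej2_c67c794b17847af8781c76f14ce11451.py | amigos
-- ===== SOURCE A (Python) =====
-- def amigos(a, b):
--     lamigos = []
--     for i in sorted(a):
--         list_temp = []
--         for j in sorted(b):
--             maxn = max(i, j)
--             minn = min(i, j)
--             un = int(str(maxn)[0] + (len(str(maxn)) - 1) * '0')
--             if (minn in list(range(un, maxn)) and maxn > 99):
--                 list_temp.append(j)
--         if (len(list_temp) > 0):
--             lamigos.append([i] + list_temp)
--     return lamigos
-- ===== SOURCE B (Python) =====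
-- def amigos(a, b):
--     # Bucket the b-values >= 100 by their leading-digit prefix (e.g. 123 -> 100),
--     # then answer each i with one dictionary lookup instead of rescanning b.
--     buckets = {}
--     for j in sorted(b):
--         if j > 99:
--             s = str(j)
--             p = int(s[0]) * 10 ** (len(s) - 1)
--             buckets[p] = buckets.get(p, []) + [j]
--     out = []
--     for i in sorted(a):
--         if i > 99:
--             s = str(i)
--             temp = [j for j in buckets.get(int(s[0]) * 10 ** (len(s) - 1), []) if j != i]
--             if temp:
--                 out.append([i] + temp)
--     return out
-- ===== Notes on version B (the rewrite author's own statement) =====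
-- stated objective: faster
-- what changed: B buckets the b-values >= 100 once in a dict keyed by their leading-digit prefix (e.g. 123 -> 100) and answers each i with one lookup, instead of A's nested rescan of sorted(b) that materialises list(range(un, maxn)) for every pair.
import Mathlib
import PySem

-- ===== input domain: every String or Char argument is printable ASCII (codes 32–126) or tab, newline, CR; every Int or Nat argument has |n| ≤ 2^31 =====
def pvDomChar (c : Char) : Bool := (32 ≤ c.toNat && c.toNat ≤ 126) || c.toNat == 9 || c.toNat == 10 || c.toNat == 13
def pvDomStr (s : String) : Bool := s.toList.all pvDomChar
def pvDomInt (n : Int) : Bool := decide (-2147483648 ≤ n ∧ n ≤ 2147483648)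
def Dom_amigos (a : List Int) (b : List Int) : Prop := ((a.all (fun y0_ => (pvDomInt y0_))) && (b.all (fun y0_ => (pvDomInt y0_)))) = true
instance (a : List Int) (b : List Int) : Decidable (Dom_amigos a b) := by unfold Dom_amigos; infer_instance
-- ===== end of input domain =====

-- B buckets the b-values ≥ 100 once by their leading-digit prefix and answers each i by one
-- dictionary lookup, instead of A's per-pair materialisation of list(range(un, maxn)); faster.

-- ===== PORT A =====
def amigos (a : List Int) (b : List Int) : List (List Int) :=
  (PySem.List.sorted a (fun x => x) false).foldl (fun lamigos i =>
    let list_temp :=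
      (PySem.List.sorted b (fun x => x) false).foldl (fun list_temp j =>
        let maxn := max i j
        let minn := min i j
        -- str(maxn) is never empty, and first-char + zeros is always a valid int literal,
        -- so the two .getD defaults below are unreachable (exact)
        let s := PySem.Int.toStr maxn
        let un := (PySem.Int.ofStr? (String.ofList
            ((PySem.Str.pyGet? s 0).getD '0' :: List.replicate (PySem.Str.len s - 1).toNat '0'))).getD 0
        if (PySem.List.pyRange un maxn 1).contains minn && decide (99 < maxn)
        then list_temp ++ [j] else list_temp) []
    if 0 < list_temp.length then lamigos ++ [[i] ++ list_temp] else lamigos) []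

-- ===== PORT B =====
-- pref(n) of Source B: int(str(n)[0]) * 10 ** (len(str(n)) - 1); only called on n > 99, where
-- str(n) is a nonempty digit string, so the .getD defaults are unreachable (exact)
def amigosPref (n : Int) : Int :=
  let s := PySem.Int.toStr n
  (PySem.Int.ofStr? (String.ofList [(PySem.Str.pyGet? s 0).getD '0'])).getD 0
    * 10 ^ (PySem.Str.len s - 1).toNat

def amigos_alt (a : List Int) (b : List Int) : List (List Int) :=
  let buckets := (PySem.List.sorted b (fun x => x) false).foldl (fun buckets j =>
      if 99 < j then
        let p := amigosPref j
        buckets.insert p (buckets.getD p [] ++ [j])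
      else buckets) (PySem.Dict.empty : PySem.Dict Int (List Int))
  (PySem.List.sorted a (fun x => x) false).foldl (fun out i =>
    if 99 < i then
      let temp := (buckets.getD (amigosPref i) []).filter (fun j => j != i)
      if 0 < temp.length then out ++ [[i] ++ temp] else out
    else out) []

-- ===== PRECONDITION & SPEC =====
def Spec_amigos (a : List Int) (b : List Int) (out : List (List Int)) : Prop := out = amigos_alt a b
instance (a : List Int) (b : List Int) (out : List (List Int)) : Decidable (Spec_amigos a b out) := by unfold Spec_amigos; infer_instance

-- ===== CLAIM (what is proved, stated in full; the proofs are below) =====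
def Claim_equal_amigos : Prop := ∀ (a : List Int) (b : List Int), Dom_amigos a b → Spec_amigos a b (amigos a b)

-- ===== LEMMAS AND PROOFS =====

-- the leading-digit prefix of n as pure arithmetic on n.toNat
def K10 (n : Int) : Int :=
  ((n.toNat / 10 ^ Nat.log 10 n.toNat) * 10 ^ Nat.log 10 n.toNat : Nat)

-- decimal digit characters of n, most significant first (what Nat.toDigits 10 computes)
def digAux (n : Nat) : List Char :=
  if h : n < 10 then [Nat.digitChar n]
  else digAux (n / 10) ++ [Nat.digitChar (n % 10)]
  decreasing_by exact Nat.div_lt_self (by omega) (by omega)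

theorem toDigitsCore_eq (fuel : Nat) : ∀ (n : Nat) (ds : List Char), n < fuel →
    Nat.toDigitsCore 10 fuel n ds = digAux n ++ ds := by
  induction fuel with
  | zero => intro n ds h; omega
  | succ fuel ih =>
    intro n ds h
    rw [Nat.toDigitsCore]
    by_cases h10 : n < 10
    · have hz : n / 10 = 0 := Nat.div_eq_of_lt h10
      simp [hz, digAux, h10, Nat.mod_eq_of_lt h10]
    · have hz : ¬ n / 10 = 0 := by
        intro hc; have := Nat.div_eq_of_lt (by omega : n < 10); omega
      simp only [hz, if_neg]
      rw [ih (n / 10) _ (by have := Nat.div_lt_self (by omega : 0 < n) (by omega : 1 < 10); omega)]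
      conv_rhs => rw [digAux]
      simp [h10]
theorem toDigits_eq (n : Nat) : Nat.toDigits 10 n = digAux n := by
  rw [Nat.toDigits, toDigitsCore_eq (n+1) n [] (by omega)]; simp

theorem digAux_spec (n : Nat) (h : 0 < n) :
    ∃ t, digAux n = Nat.digitChar (n / 10 ^ Nat.log 10 n) :: t ∧ t.length = Nat.log 10 n := by
  induction n using Nat.strong_induction_on with
  | _ n ih =>
    by_cases h10 : n < 10
    · have hl : Nat.log 10 n = 0 := Nat.log_eq_zero_iff.mpr (Or.inl h10)
      refine ⟨[], ?_, by simp [hl]⟩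
      rw [digAux]; simp [h10, hl]
    · have hpos : 0 < n / 10 := Nat.div_pos (by omega) (by omega)
      obtain ⟨t', ht', hlen'⟩ := ih (n / 10) (Nat.div_lt_self (by omega) (by omega)) hpos
      have hl1 : 1 ≤ Nat.log 10 n := by
        rw [Nat.le_log_iff_pow_le (by omega) (by omega)]; simpa using (by omega : 10 ≤ n)
      have hld : Nat.log 10 (n / 10) = Nat.log 10 n - 1 := Nat.log_div_base 10 n
      have hdd : n / 10 / 10 ^ (Nat.log 10 n - 1) = n / 10 ^ Nat.log 10 n := by
        rw [Nat.div_div_eq_div_mul]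
        congr 1
        rw [← pow_succ']
        congr 1
        omega
      refine ⟨t' ++ [Nat.digitChar (n % 10)], ?_, by simp [hlen', hld]; omega⟩
      rw [digAux]
      simp only [h10, dif_neg, not_false_iff]
      rw [ht', hld, hdd]
      simp

theorem ofChars_digit_zeros (f L : Nat) (h1 : 1 ≤ f) (h2 : f ≤ 9) (hL : L ≤ 9) :
    PySem.Int.ofChars? (Nat.digitChar f :: List.replicate L '0') = some ((f * 10 ^ L : Nat)) := by
  interval_cases f <;> interval_cases L <;> decide

theorem toChars_big (n : Int) (h1 : 99 < n) (h2 : n ≤ 2147483648) :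
    ∃ t, PySem.Int.toChars n = Nat.digitChar (n.toNat / 10 ^ Nat.log 10 n.toNat) :: t ∧
      t.length = Nat.log 10 n.toNat ∧
      1 ≤ n.toNat / 10 ^ Nat.log 10 n.toNat ∧ n.toNat / 10 ^ Nat.log 10 n.toNat ≤ 9 ∧
      Nat.log 10 n.toNat ≤ 9 := by
  have hnn : ¬ n < 0 := by omega
  have hpos : 0 < n.toNat := by omega
  obtain ⟨t, ht, hlen⟩ := digAux_spec n.toNat hpos
  refine ⟨t, ?_, hlen, ?_, ?_, ?_⟩
  · rw [PySem.Int.toChars]; simp [hnn]; rw [toDigits_eq]; exact ht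
  · have := Nat.pow_log_le_self 10 (x := n.toNat) (by omega)
    exact Nat.one_le_div_iff (Nat.pow_pos (by omega)) |>.mpr this
  · have hlt := Nat.lt_pow_succ_log_self (by omega : 1 < 10) n.toNat
    have hp : 0 < 10 ^ Nat.log 10 n.toNat := Nat.pow_pos (by omega)
    have : n.toNat / 10 ^ Nat.log 10 n.toNat < 10 := by
      apply Nat.div_lt_of_lt_mul
      have : (10:Nat) ^ (Nat.log 10 n.toNat).succ = 10 * 10 ^ Nat.log 10 n.toNat := by
        rw [pow_succ]; ring
      omega
    omega
  · have : n.toNat < 10 ^ 10 := by omega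
    have := Nat.log_lt_of_lt_pow (by omega : n.toNat ≠ 0) this
    omega


theorem toStr_facts (n : Int) (h1 : 99 < n) (h2 : n ≤ 2147483648) :
    (PySem.Str.pyGet? (PySem.Int.toStr n) 0).getD '0'
        = Nat.digitChar (n.toNat / 10 ^ Nat.log 10 n.toNat) ∧
    (PySem.Str.len (PySem.Int.toStr n) - 1).toNat = Nat.log 10 n.toNat := by
  obtain ⟨t, ht, hlen, hf1, hf9, hL⟩ := toChars_big n h1 h2
  have htl : (PySem.Int.toStr n).toList = PySem.Int.toChars n := PySem.Int.toList_toStr n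
  constructor
  · rw [PySem.Str.pyGet?, htl, ht, PySem.Chars.pyGet?, PySem.List.pyGet?_zero_cons]
    rfl
  · rw [PySem.Str.len, htl, ht]
    simp [hlen]

theorem unA_eq (n : Int) (h1 : 99 < n) (h2 : n ≤ 2147483648) :
    (PySem.Int.ofStr? (String.ofList
        ((PySem.Str.pyGet? (PySem.Int.toStr n) 0).getD '0'
          :: List.replicate (PySem.Str.len (PySem.Int.toStr n) - 1).toNat '0'))).getD 0 = K10 n := by
  obtain ⟨t, ht, hlen, hf1, hf9, hL⟩ := toChars_big n h1 h2
  obtain ⟨hc, hl⟩ := toStr_facts n h1 h2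
  rw [hc, hl, PySem.Int.ofStr?_ofList, ofChars_digit_zeros _ _ hf1 hf9 hL]
  rfl

theorem unB_eq (n : Int) (h1 : 99 < n) (h2 : n ≤ 2147483648) : amigosPref n = K10 n := by
  obtain ⟨t, ht, hlen, hf1, hf9, hL⟩ := toChars_big n h1 h2
  obtain ⟨hc, hl⟩ := toStr_facts n h1 h2
  rw [amigosPref]
  simp only [hc, hl]
  have h0 := ofChars_digit_zeros (n.toNat / 10 ^ Nat.log 10 n.toNat) 0 hf1 hf9 (by omega)
  simp only [List.replicate, pow_zero, Nat.mul_one] at h0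
  rw [PySem.Int.ofStr?_ofList, h0]
  rw [K10]
  push_cast
  rfl

theorem K10_le (n : Int) (h : 0 < n) : K10 n ≤ n := by
  rw [K10]
  have := Nat.div_mul_le_self n.toNat (10 ^ Nat.log 10 n.toNat)
  omega

theorem K10_ge100 (n : Int) (h : 99 < n) : 100 ≤ K10 n := by
  rw [K10]
  have hf1 : 1 ≤ n.toNat / 10 ^ Nat.log 10 n.toNat := by
    have := Nat.pow_log_le_self 10 (x := n.toNat) (by omega)
    exact Nat.one_le_div_iff (Nat.pow_pos (by omega)) |>.mpr this
  have hL : 2 ≤ Nat.log 10 n.toNat := by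
    rw [Nat.le_log_iff_pow_le (by omega) (by omega)]
    have : (10:Nat)^2 = 100 := by norm_num
    omega
  have : (100:Nat) ≤ 10 ^ Nat.log 10 n.toNat := by
    calc (100:Nat) = 10 ^ 2 := by norm_num
      _ ≤ 10 ^ Nat.log 10 n.toNat := Nat.pow_le_pow_right (by omega) hL
  have := Nat.le_mul_of_pos_left (10 ^ Nat.log 10 n.toNat) (by omega : 0 < n.toNat / 10 ^ Nat.log 10 n.toNat)
  omega

theorem K10_stable_nat (M K : Nat) (hM : 99 < M)
    (hlo : (M / 10 ^ Nat.log 10 M) * 10 ^ Nat.log 10 M ≤ K) (hhi : K < M) :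
    (K / 10 ^ Nat.log 10 K) * 10 ^ Nat.log 10 K
      = (M / 10 ^ Nat.log 10 M) * 10 ^ Nat.log 10 M := by
  set L := Nat.log 10 M with hLdef
  set F := M / 10 ^ L with hFdef
  have hp : 0 < (10:Nat) ^ L := Nat.pow_pos (by omega)
  have hf1 : 1 ≤ F := by
    have := Nat.pow_log_le_self 10 (x := M) (by omega)
    exact Nat.one_le_div_iff hp |>.mpr this
  have hf9 : F ≤ 9 := by
    have hlt : M < 10 ^ (Nat.log 10 M).succ := Nat.lt_pow_succ_log_self (by omega : 1 < 10) M
    rw [← hLdef] at hlt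
    rw [Nat.succ_eq_add_one, pow_succ] at hlt
    have h4 : M / 10 ^ L < 10 := Nat.div_lt_of_lt_mul hlt
    rw [← hFdef] at h4
    omega
  have hmod : M % 10 ^ L < 10 ^ L := Nat.mod_lt _ hp
  have hsplit : F * 10 ^ L + M % 10 ^ L = M := by
    rw [hFdef, Nat.mul_comm]; exact Nat.div_add_mod M (10 ^ L)
  have hMhi : M < (F + 1) * 10 ^ L := by
    calc M = F * 10 ^ L + M % 10 ^ L := hsplit.symm
      _ < F * 10 ^ L + 10 ^ L := by omega
      _ = (F + 1) * 10 ^ L := by ring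
  have hkhi : K < (F + 1) * 10 ^ L := lt_trans hhi hMhi
  have hlogk : Nat.log 10 K = L := by
    apply Nat.log_eq_of_pow_le_of_lt_pow
    · calc (10:Nat) ^ L ≤ F * 10 ^ L := Nat.le_mul_of_pos_left _ (by omega)
        _ ≤ K := hlo
    · calc K < (F + 1) * 10 ^ L := hkhi
        _ ≤ 10 * 10 ^ L := Nat.mul_le_mul_right _ (by omega)
        _ = 10 ^ (L + 1) := by rw [pow_succ]; ring
  have hdivk : K / 10 ^ L = F := Nat.div_eq_of_lt_le hlo hkhi
  rw [hlogk, hdivk]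

theorem K10_stable (m k : Int) (hm : 99 < m) (hk : K10 m ≤ k) (hkm : k < m) : K10 k = K10 m := by
  have hk100 : 99 < k := by have := K10_ge100 m hm; omega
  rw [K10] at hk
  have h := K10_stable_nat m.toNat k.toNat (by omega) (by omega) (by omega)
  rw [K10, K10]
  exact congrArg (fun x : Nat => (x : Int)) h

theorem condA_iff (i j : Int) (hi2 : i ≤ 2147483648) (hj2 : j ≤ 2147483648) :
    ((PySem.List.pyRange ((PySem.Int.ofStr? (String.ofList
        ((PySem.Str.pyGet? (PySem.Int.toStr (max i j)) 0).getD '0'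
          :: List.replicate (PySem.Str.len (PySem.Int.toStr (max i j)) - 1).toNat '0'))).getD 0)
        (max i j) 1).contains (min i j) && decide (99 < max i j))
    = (decide (99 < i) && decide (99 < j) && decide (K10 j = K10 i) && (j != i)) := by
  by_cases hmax : 99 < max i j
  · rw [unA_eq (max i j) hmax (max_le hi2 hj2)]
    have hcont : ((PySem.List.pyRange (K10 (max i j)) (max i j) 1).contains (min i j))
        = decide (K10 (max i j) ≤ min i j ∧ min i j < max i j) := by
      simp [PySem.List.mem_pyRange_one]
    rw [hcont]
    simp only [Bool.and_eq_true, decide_eq_true_eq, bne, Bool.not_eq_true', beq_iff_eq]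
    rcases le_total i j with hij | hij
    · rw [max_eq_right hij, min_eq_left hij]
      rw [max_eq_right hij] at hmax
      have hbeq : (j == i) = decide (j = i) := by by_cases h : j = i <;> simp [h]
      rw [hbeq, ← decide_not]; simp only [← Bool.decide_and]
      apply decide_eq_decide.mpr
      constructor
      · rintro ⟨⟨hlo, hlt⟩, h99⟩
        have h100 := K10_ge100 j h99
        have hi99 : 99 < i := by omega
        refine ⟨⟨⟨hi99, h99⟩, ?_⟩, by omega⟩
        exact (K10_stable j i h99 hlo hlt).symm
      · rintro ⟨⟨⟨hi99, hj99⟩, hKeq⟩, hne⟩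
        have hlt : i < j := by omega
        have := K10_le i (by omega)
        exact ⟨⟨by omega, hlt⟩, hj99⟩
    · rw [max_eq_left hij, min_eq_right hij]
      rw [max_eq_left hij] at hmax
      have hbeq : (j == i) = decide (j = i) := by by_cases h : j = i <;> simp [h]
      rw [hbeq, ← decide_not]; simp only [← Bool.decide_and]
      apply decide_eq_decide.mpr
      constructor
      · rintro ⟨⟨hlo, hlt⟩, h99⟩
        have h100 := K10_ge100 i h99
        have hj99 : 99 < j := by omega
        exact ⟨⟨⟨h99, hj99⟩, K10_stable i j h99 hlo hlt⟩, by omega⟩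
      · rintro ⟨⟨⟨hi99, hj99⟩, hKeq⟩, hne⟩
        have hlt : j < i := by omega
        have := K10_le j (by omega)
        exact ⟨⟨by omega, hlt⟩, hi99⟩
  · have hi99 : ¬ 99 < i := fun h => hmax (lt_of_lt_of_le h (le_max_left i j))
    simp [hmax, hi99]

theorem bucket_getD (js : List Int) (d : PySem.Dict Int (List Int)) (p : Int) :
    ((js.foldl (fun buckets j =>
        if 99 < j then
          buckets.insert (amigosPref j) (buckets.getD (amigosPref j) [] ++ [j])
        else buckets) d).getD p [])
    = d.getD p [] ++ js.filter (fun j => decide (99 < j) && (amigosPref j == p)) := by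
  induction js generalizing d with
  | nil => simp
  | cons j js ih =>
    simp only [List.foldl_cons, List.filter_cons]
    by_cases h99 : 99 < j
    · rw [ih]
      by_cases hp : amigosPref j = p
      · simp [h99, hp, PySem.Dict.getD_insert]
      · have : (amigosPref j == p) = false := by simp [hp]
        simp only [h99, if_true, this, Bool.false_and, Bool.and_false, if_false]
        rw [PySem.Dict.getD_insert]
        simp [Ne.symm hp]
    · simp only [h99, if_false, decide_false, Bool.false_and, if_neg]
      rw [ih]
      simp

-- A's inner loop collects exactly the j satisfying its condition, in order
theorem foldl_append_if_id (p : Int → Bool) (l : List Int) (acc : List Int) :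
    List.foldl (fun acc x => if p x = true then acc ++ [x] else acc) acc l
      = acc ++ l.filter p := by
  have h := PySem.List.foldl_append_if p (fun x => x) l acc
  simpa using h

-- A's per-pair condition equals B's bucket-membership condition (99 < i known)
theorem condAB (i j : Int) (h99i : 99 < i) (hi2 : i ≤ 2147483648) (hj2 : j ≤ 2147483648) :
    ((PySem.List.pyRange ((PySem.Int.ofStr? (String.ofList
        ((PySem.Str.pyGet? (PySem.Int.toStr (max i j)) 0).getD '0'
          :: List.replicate (PySem.Str.len (PySem.Int.toStr (max i j)) - 1).toNat '0'))).getD 0)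
        (max i j) 1).contains (min i j) && decide (99 < max i j))
    = ((j != i) && (decide (99 < j) && (amigosPref j == amigosPref i))) := by
  rw [condA_iff i j hi2 hj2]
  by_cases h99j : 99 < j
  · rw [unB_eq j h99j hj2, unB_eq i h99i hi2]
    have hb : (K10 j == K10 i) = decide (K10 j = K10 i) := by
      by_cases h : K10 j = K10 i <;> simp [h]
    rw [hb]
    simp only [h99i, h99j, decide_true, Bool.true_and]
    cases decide (K10 j = K10 i) <;> cases (j != i) <;> simp
  · simp [h99j]

-- when i ≤ 99 A's condition never fires
theorem condA_false (i j : Int) (h99i : ¬ 99 < i) (hi2 : i ≤ 2147483648) (hj2 : j ≤ 2147483648) :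
    ((PySem.List.pyRange ((PySem.Int.ofStr? (String.ofList
        ((PySem.Str.pyGet? (PySem.Int.toStr (max i j)) 0).getD '0'
          :: List.replicate (PySem.Str.len (PySem.Int.toStr (max i j)) - 1).toNat '0'))).getD 0)
        (max i j) 1).contains (min i j) && decide (99 < max i j)) = false := by
  rw [condA_iff i j hi2 hj2]
  simp [h99i]

-- ===== VERDICT (by name: the statement is the Claim_ definition above) =====
theorem amigos_spec : Claim_equal_amigos := by
  intro a b hdom
  show amigos a b = amigos_alt a b
  unfold Dom_amigos at hdom
  simp only [Bool.and_eq_true, List.all_eq_true, pvDomInt, decide_eq_true_eq] at hdom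
  obtain ⟨hda, hdb⟩ := hdom
  unfold amigos amigos_alt
  simp only []
  apply PySem.List.foldl_congr_mem
  intro acc i hi
  have hia : i ∈ a := (PySem.List.mem_sorted a (fun x => x) false i).mp hi
  have hi2 : i ≤ 2147483648 := (hda i hia).2
  by_cases h99i : 99 < i
  · rw [foldl_append_if_id, List.nil_append, bucket_getD, PySem.Dict.getD_empty,
        List.nil_append, List.filter_filter,
        List.filter_congr (fun j hj => condAB i j h99i hi2
          ((hdb j ((PySem.List.mem_sorted b (fun x => x) false j).mp hj)).2)),
        if_pos h99i]
  · rw [foldl_append_if_id, List.nil_append,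
        List.filter_eq_nil_iff.mpr (fun j hj => by
          rw [condA_false i j h99i hi2
            ((hdb j ((PySem.List.mem_sorted b (fun x => x) false j).mp hj)).2)]
          exact Bool.false_ne_true),
        if_neg h99i]
    simp
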